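-- pv_equiv track=rewrite | github.com/codebicycle/python-practice-two | advent_of_code_2017/day9.py | clean_accolades_in_garbage
-- ===== SOURCE A (Python) =====
-- def clean_accolades_in_garbage(stream):
--     stream = list(stream)
--     for index, char in enumerate(stream):
--         if char == '<':
--             for index2, char2 in enumerate(stream[index:], start=index):
--                 if char2 == '>':
--                     break
--                 if char2 in '}{':
--                     stream[index2] = ''
--     return stream
-- ===== SOURCE B (Python) =====
-- def clean_accolades_in_garbage(stream):
--     out = []
--     in_garbage = False
--     for char in stream:
--         if char == '<':
--             in_garbage = True
--             out.append(char)
--         elif char == '>':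
--             in_garbage = False
--             out.append(char)
--         elif in_garbage and char in '}{':
--             out.append('')
--         else:
--             out.append(char)
--     return out
-- ===== Notes on version B (the rewrite author's own statement) =====
-- stated objective: alternative
-- what changed: replaced the nested rescan from every garbage opener (mutating the list in place) by a single left-to-right pass carrying an in-garbage boolean flag toggled by the garbage open and close markers
import Mathlib
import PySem

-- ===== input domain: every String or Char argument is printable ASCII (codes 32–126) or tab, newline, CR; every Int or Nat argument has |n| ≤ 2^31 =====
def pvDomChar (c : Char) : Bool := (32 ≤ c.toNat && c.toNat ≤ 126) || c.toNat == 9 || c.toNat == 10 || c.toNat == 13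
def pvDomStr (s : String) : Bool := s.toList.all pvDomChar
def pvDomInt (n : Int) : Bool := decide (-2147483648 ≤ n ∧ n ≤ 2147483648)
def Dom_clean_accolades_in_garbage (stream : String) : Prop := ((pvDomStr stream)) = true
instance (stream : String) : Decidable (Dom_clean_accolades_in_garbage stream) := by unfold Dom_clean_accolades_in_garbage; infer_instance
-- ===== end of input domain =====

-- B replaces A's nested rescan from every garbage opener with a single pass over the stream carrying an
-- in-garbage boolean flag; equivalence of the RETURN values is proved (A mutates only its local copy).

-- ===== PORT A =====
-- `char2 in '}{'` is Python substring membership: true exactly for '}', '{' and ''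
-- (the only strings ever present are single input characters and '').
def pvInBraces (c : String) : Bool := c = "}" || c = "{" || c = ""

-- inner loop: `for index2, char2 in enumerate(stream[index:], start=index)` iterating the
-- copy `copy = stream[index:]` while assigning `stream[index2] = ''` into the live list `s`.
def pvInner (copy : List String) (index2 : Nat) (s : List String) : List String :=
  match copy with
  | [] => s
  | char2 :: rest =>
    if char2 = ">" then s
    else pvInner rest (index2 + 1) (if pvInBraces char2 then s.set index2 "" else s)

-- outer loop: `for index, char in enumerate(stream)` over the live (mutated) list, by index;
-- fuel = length, which mutation by `set` never changes.
def pvOuter (s : List String) (index : Nat) (fuel : Nat) : List String :=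
  match fuel with
  | 0 => s
  | fuel + 1 =>
    let char := s.getD index ""
    let s' := if char = "<" then pvInner (s.drop index) index s else s
    pvOuter s' (index + 1) fuel

def clean_accolades_in_garbage (stream : String) : List String :=
  let s := stream.toList.map (fun c => String.ofList [c])   -- stream = list(stream)
  pvOuter s 0 s.length

-- ===== PORT B =====
def pvAltLoop (cs : List Char) (inGarbage : Bool) : List String :=
  match cs with
  | [] => []
  | c :: rest =>
    if c = '<' then String.ofList [c] :: pvAltLoop rest true
    else if c = '>' then String.ofList [c] :: pvAltLoop rest false
    else if inGarbage && (c = '}' || c = '{') then "" :: pvAltLoop rest inGarbage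
    else String.ofList [c] :: pvAltLoop rest inGarbage

def clean_accolades_in_garbage_alt (stream : String) : List String :=
  pvAltLoop stream.toList false

-- ===== PRECONDITION & SPEC =====
def Spec_clean_accolades_in_garbage (stream : String) (out : List String) : Prop := out = clean_accolades_in_garbage_alt stream
instance (stream : String) (out : List String) : Decidable (Spec_clean_accolades_in_garbage stream out) := by unfold Spec_clean_accolades_in_garbage; infer_instance

-- ===== CLAIM (what is proved, stated in full; the proofs are below) =====
def Claim_equal_clean_accolades_in_garbage : Prop := ∀ (stream : String), Dom_clean_accolades_in_garbage stream → Spec_clean_accolades_in_garbage stream (clean_accolades_in_garbage stream)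

-- ===== LEMMAS AND PROOFS =====

-- `pvBlank r` = what one run of the inner loop does to the region r starting at a '<':
-- blank every '{' '}' (and keep '') until the first '>', leave the rest untouched.
def pvBlank (r : List String) : List String :=
  match r with
  | [] => []
  | c :: rest => if c = ">" then c :: rest
                 else (if pvInBraces c then "" else c) :: pvBlank rest

-- `pvB r g` = B's flag pass lifted to the list-of-strings state A works on.
def pvB (r : List String) (g : Bool) : List String :=
  match r with
  | [] => []
  | c :: rest =>
    if c = "<" then c :: pvB rest true
    else if c = ">" then c :: pvB rest false
    else if g && pvInBraces c then "" :: pvB rest g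
    else c :: pvB rest g

theorem pvBlank_length (r : List String) : (pvBlank r).length = r.length := by
  induction r with
  | nil => rfl
  | cons c rest ih =>
    simp only [pvBlank]
    split <;> simp [ih]

theorem pvSet_append (pre : List String) (c v : String) (rest : List String) :
    (pre ++ c :: rest).set pre.length v = pre ++ v :: rest := by
  induction pre with
  | nil => rfl
  | cons a pre ih => simp [List.set, ih]

theorem pvGetD_append (pre : List String) (c : String) (rest : List String) :
    (pre ++ c :: rest).getD pre.length "" = c := by
  induction pre with
  | nil => rfl
  | cons a pre ih => simpa [List.getD] using ih

theorem pvDrop_append (pre : List String) (r : List String) :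
    (pre ++ r).drop pre.length = r := by
  simp

-- the inner loop starting at index |pre| over copy r of the live list pre ++ r
theorem pvInner_eq (r : List String) : ∀ pre : List String,
    pvInner r pre.length (pre ++ r) = pre ++ pvBlank r := by
  induction r with
  | nil => intro pre; simp [pvInner, pvBlank]
  | cons c rest ih =>
    intro pre
    simp only [pvInner, pvBlank]
    by_cases hc : c = ">"
    · simp [hc]
    · simp only [hc, if_neg, if_false]
      by_cases hb : pvInBraces c
      · have hset := pvSet_append pre c "" rest
        have := ih (pre ++ [""])
        simp only [hb, if_true, hc, if_false, hset]
        simpa using this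
      · have := ih (pre ++ [c])
        simp only [hb, if_false, hc]
        simpa using this

-- one blanking pass is idempotent on the flag-pass: after pvBlank, running B with the flag
-- already ON gives the same as B on the original with the flag ON
theorem pvB_blank_true (r : List String) : pvB (pvBlank r) true = pvB r true := by
  induction r with
  | nil => rfl
  | cons c rest ih =>
    by_cases hgt : c = ">"
    · subst hgt; simp [pvBlank, pvB]
    · by_cases hlt : c = "<"
      · subst hlt; simp [pvBlank, pvB, pvInBraces, ih]
      · by_cases hb : pvInBraces c
        · have hbe : pvInBraces ("" : String) = true := rfl
          have h1 : ("" : String) ≠ "<" := by decide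
          have h2 : ("" : String) ≠ ">" := by decide
          simp [pvBlank, pvB, hgt, hlt, hb, hbe, h1, h2, ih]
        · simp [pvBlank, pvB, hgt, hlt, hb, ih]

-- after the inner loop has blanked the garbage region, continuing with flag OFF over the
-- blanked list equals the flag pass with flag ON over the original
theorem pvB_blank_false (r : List String) : pvB (pvBlank r) false = pvB r true := by
  induction r with
  | nil => rfl
  | cons c rest ih =>
    by_cases hgt : c = ">"
    · subst hgt; simp [pvBlank, pvB]
    · by_cases hlt : c = "<"
      · subst hlt; simp [pvBlank, pvB, pvInBraces, pvB_blank_true rest]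
      · by_cases hb : pvInBraces c
        · have hbe : pvInBraces ("" : String) = true := rfl
          have h1 : ("" : String) ≠ "<" := by decide
          have h2 : ("" : String) ≠ ">" := by decide
          simp [pvBlank, pvB, hgt, hlt, hb, hbe, h1, h2, ih]
        · simp [pvBlank, pvB, hgt, hlt, hb, ih]

-- main loop invariant: with the prefix pre already final, the outer loop on pre ++ r with
-- fuel |r| produces pre ++ (flag pass of r with flag OFF)
theorem pvOuter_eq : ∀ (n : Nat) (r pre : List String), r.length = n →
    pvOuter (pre ++ r) pre.length n = pre ++ pvB r false := by
  intro n
  induction n with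
  | zero =>
    intro r pre hr
    have : r = [] := List.eq_nil_of_length_eq_zero hr
    subst this; simp [pvOuter, pvB]
  | succ n ih =>
    intro r pre hr
    match r, hr with
    | c :: rest, hr =>
      have hrest : rest.length = n := by simpa using hr
      simp only [pvOuter, pvGetD_append]
      by_cases hlt : c = "<"
      · subst hlt
        have hdrop : (pre ++ "<" :: rest).drop pre.length = "<" :: rest := pvDrop_append pre _
        rw [hdrop]
        have hinner : pvInner ("<" :: rest) pre.length (pre ++ "<" :: rest) = pre ++ pvBlank ("<" :: rest) :=
          pvInner_eq ("<" :: rest) pre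
        have hblank : pvBlank ("<" :: rest) = "<" :: pvBlank rest := by
          simp [pvBlank, pvInBraces]
        have hlen : (pvBlank rest).length = n := by rw [pvBlank_length]; exact hrest
        have step := ih (pvBlank rest) (pre ++ ["<"]) hlen
        rw [if_pos rfl, hinner, hblank]
        calc pvOuter (pre ++ "<" :: pvBlank rest) (pre.length + 1) n
            = pvOuter ((pre ++ ["<"]) ++ pvBlank rest) (pre ++ ["<"]).length n := by
              simp
          _ = (pre ++ ["<"]) ++ pvB (pvBlank rest) false := step
          _ = pre ++ pvB ("<" :: rest) false := by
              simp [pvB, pvB_blank_false rest]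
      · have step := ih rest (pre ++ [c]) hrest
        have hBc : pvB (c :: rest) false = c :: pvB rest false := by
          by_cases hgt : c = ">" <;> simp [pvB, hlt, hgt]
        simp only [hlt, if_false]
        calc pvOuter (pre ++ c :: rest) (pre.length + 1) n
            = pvOuter ((pre ++ [c]) ++ rest) (pre ++ [c]).length n := by simp
          _ = (pre ++ [c]) ++ pvB rest false := step
          _ = pre ++ pvB (c :: rest) false := by simp [hBc]
        done

-- the flag pass on singleton strings is exactly B's character pass
theorem pvB_map_sing (l : List Char) : ∀ g : Bool,
    pvB (l.map (fun c => String.ofList [c])) g = pvAltLoop l g := by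
  induction l with
  | nil => intro g; rfl
  | cons c rest ih =>
    intro g
    by_cases h1 : c = '<'
    · subst h1; cases g <;> simp [pvB, pvAltLoop, pvInBraces, ih]
    · by_cases h2 : c = '>'
      · subst h2; cases g <;> simp [pvB, pvAltLoop, pvInBraces, ih]
      · have e1 : String.ofList [c] ≠ "<" := by simp [String.ext_iff, h1]
        have e2 : String.ofList [c] ≠ ">" := by simp [String.ext_iff, h2]
        have e3 : pvInBraces (String.ofList [c]) = (c = '}' || c = '{') := by
          simp [pvInBraces, String.ext_iff]
        cases g <;> by_cases h3 : (c = '}' || c = '{') = true <;>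
          simp [pvB, pvAltLoop, e1, e2, e3, h1, h2, h3, ih]

-- ===== VERDICT (by name: the statement is the Claim_ definition above) =====
theorem clean_accolades_in_garbage_spec : Claim_equal_clean_accolades_in_garbage := by
  intro stream _
  show clean_accolades_in_garbage stream = clean_accolades_in_garbage_alt stream
  unfold clean_accolades_in_garbage clean_accolades_in_garbage_alt
  have h := pvOuter_eq (stream.toList.map (fun c => String.ofList [c])).length
      (stream.toList.map (fun c => String.ofList [c])) [] rfl
  simpa [pvB_map_sing] using h
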